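-- pv_equiv track=rewrite | github.com/Venkatesh-108/SRM_RAG_FINAL | pdf_processing/searcher.py | _is_procedural_subheading
-- ===== SOURCE A (Python) =====
-- def _is_procedural_subheading(text: str) -> bool:
--     """Detect procedural sub-headings that should remain part of the main content."""
--     if not text:
--         return False
--
--     text_lower = text.strip().lower()
--
--     # Remove markdown formatting for checking
--     clean_text = text_lower.replace('#', '').strip()
--
--     # Common procedural sub-headings that should not split content
--     procedural_subheadings = [
--         'steps', 'procedure', 'instructions', 'process', 'method',
--         'prerequisites', 'requirements', 'before you begin',
--         'next steps', 'what to do next', 'continue with',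
--         'follow these steps', 'to do this', 'implementation',
--         'example', 'examples', 'note', 'notes', 'important',
--         'warning', 'caution', 'tip', 'tips', 'result', 'results',
--         'outcome', 'expected result', 'verification', 'verify',
--         'troubleshooting', 'if this fails', 'alternative'
--     ]
--
--     # Check if the clean text matches any procedural sub-heading
--     for subheading in procedural_subheadings:
--         if clean_text == subheading or clean_text.startswith(subheading + ' '):
--             return True
--
--     # Also check for very short headings that are likely sub-sections
--     if len(clean_text.split()) <= 2 and len(clean_text) <= 15:
--         return True
--
--     return False
-- ===== SOURCE B (Python) =====
-- _PROCEDURAL_SET = frozenset([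
--     'steps', 'procedure', 'instructions', 'process', 'method',
--     'prerequisites', 'requirements', 'before you begin',
--     'next steps', 'what to do next', 'continue with',
--     'follow these steps', 'to do this', 'implementation',
--     'example', 'examples', 'note', 'notes', 'important',
--     'warning', 'caution', 'tip', 'tips', 'result', 'results',
--     'outcome', 'expected result', 'verification', 'verify',
--     'troubleshooting', 'if this fails', 'alternative'
-- ])
--
--
-- def _is_procedural_subheading(text: str) -> bool:
--     """Detect procedural sub-headings that should remain part of the main content."""
--     if not text:
--         return False
--
--     clean_text = text.strip().lower().replace('#', '').strip()
--
--     # Word-boundary prefixes of clean_text: the whole string, plus the slice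
--     # before each actual space character.  A match with any listed subheading
--     # means "equals it, or starts with it followed by a space".
--     candidates = {clean_text}
--     for i, ch in enumerate(clean_text):
--         if ch == ' ':
--             candidates.add(clean_text[:i])
--
--     if not _PROCEDURAL_SET.isdisjoint(candidates):
--         return True
--
--     # Very short headings that are likely sub-sections
--     return len(clean_text.split()) <= 2 and len(clean_text) <= 15
-- ===== Notes on version B (the rewrite author's own statement) =====
-- stated objective: alternative
-- what changed: Instead of scanning all 33 subheadings and testing equality/startswith for each, B makes one pass over clean_text collecting its word-boundary prefixes (the whole string plus the slice before each space) and tests set-disjointness against a frozenset of the subheadings; the short-heading fallback and preprocessing are kept.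
import Mathlib
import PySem

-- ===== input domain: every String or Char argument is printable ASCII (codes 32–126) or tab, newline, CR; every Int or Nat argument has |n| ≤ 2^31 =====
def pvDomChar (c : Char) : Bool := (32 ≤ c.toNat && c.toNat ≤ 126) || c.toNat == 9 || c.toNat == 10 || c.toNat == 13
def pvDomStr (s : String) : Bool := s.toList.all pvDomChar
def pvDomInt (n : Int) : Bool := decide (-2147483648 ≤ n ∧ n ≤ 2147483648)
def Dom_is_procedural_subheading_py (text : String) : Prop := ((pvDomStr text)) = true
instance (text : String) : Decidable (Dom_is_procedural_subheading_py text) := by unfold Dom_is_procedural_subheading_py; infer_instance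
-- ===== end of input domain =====

-- B replaces A's scan over all 33 subheadings (equality or startswith for each) by one pass over
-- clean_text collecting its word-boundary prefixes and a single set-disjointness test (objective: alternative).

-- ===== PORT A =====
def pvSubheadings : List (List Char) :=
  ["steps".toList, "procedure".toList, "instructions".toList, "process".toList, "method".toList,
   "prerequisites".toList, "requirements".toList, "before you begin".toList,
   "next steps".toList, "what to do next".toList, "continue with".toList,
   "follow these steps".toList, "to do this".toList, "implementation".toList,
   "example".toList, "examples".toList, "note".toList, "notes".toList, "important".toList,
   "warning".toList, "caution".toList, "tip".toList, "tips".toList, "result".toList, "results".toList,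
   "outcome".toList, "expected result".toList, "verification".toList, "verify".toList,
   "troubleshooting".toList, "if this fails".toList, "alternative".toList]

def is_procedural_subheading_py (text : String) : Bool :=
  if text == "" then false
  else
    let text_lower := PySem.Chars.lower (PySem.Chars.strip text.toList)
    let clean_text := PySem.Chars.strip (PySem.Chars.replace text_lower ['#'] [])
    if pvSubheadings.any (fun sub =>
        clean_text == sub || PySem.Chars.startswith clean_text (sub ++ [' '])) then
      true
    else
      decide ((PySem.Chars.split₀ clean_text).length ≤ 2 ∧ clean_text.length ≤ 15)

-- ===== PORT B =====
def pvProcSet : PySem.Set (List Char) := PySem.Set.ofList pvSubheadings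

-- the word-boundary prefixes of clean: the whole string plus clean[:i] for each space position i
def pvCandidates (clean : List Char) : PySem.Set (List Char) :=
  (PySem.List.enumerate clean).foldl
    (fun acc p => if p.2 == ' ' then PySem.Set.add acc (PySem.List.slice clean none (some p.1)) else acc)
    (PySem.Set.ofList [clean])

def is_procedural_subheading_py_alt (text : String) : Bool :=
  if text == "" then false
  else
    let clean_text := PySem.Chars.strip (PySem.Chars.replace (PySem.Chars.lower (PySem.Chars.strip text.toList)) ['#'] [])
    if !(PySem.Set.isdisjoint pvProcSet (pvCandidates clean_text)) then
      true
    else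
      decide ((PySem.Chars.split₀ clean_text).length ≤ 2 ∧ clean_text.length ≤ 15)

-- ===== PRECONDITION & SPEC =====
def Spec_is_procedural_subheading_py (text : String) (out : Bool) : Prop := out = is_procedural_subheading_py_alt text
instance (text : String) (out : Bool) : Decidable (Spec_is_procedural_subheading_py text out) := by unfold Spec_is_procedural_subheading_py; infer_instance

-- ===== CLAIM (what is proved, stated in full; the proofs are below) =====
def Claim_equal_is_procedural_subheading_py : Prop := ∀ (text : String), Dom_is_procedural_subheading_py text → Spec_is_procedural_subheading_py text (is_procedural_subheading_py text)

-- ===== LEMMAS AND PROOFS =====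

-- membership in the candidate fold
theorem pv_mem_foldl_add (clean : List Char) (l : List (Int × Char)) (acc : PySem.Set (List Char)) (x : List Char) :
    x ∈ l.foldl (fun acc p => if p.2 == ' ' then PySem.Set.add acc (PySem.List.slice clean none (some p.1)) else acc) acc
      ↔ x ∈ acc ∨ ∃ p ∈ l, p.2 = ' ' ∧ x = PySem.List.slice clean none (some p.1) := by
  induction l generalizing acc with
  | nil => simp
  | cons hd tl ih =>
    simp only [List.foldl_cons, ih]
    by_cases h : hd.2 = ' '
    · simp [h, PySem.Set.mem_add, or_assoc]
    · simp [h]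

theorem pv_mem_candidates (clean x : List Char) :
    x ∈ pvCandidates clean ↔
      x = clean ∨ ∃ k, ∃ _ : k < clean.length, clean[k] = ' ' ∧ x = clean.take k := by
  unfold pvCandidates
  rw [pv_mem_foldl_add]
  constructor
  · rintro (hx | ⟨p, hp, hsp, hx⟩)
    · left; simpa [PySem.Set.ofList] using hx
    · right
      rw [PySem.List.mem_enumerate_iff] at hp
      obtain ⟨k, hk, rfl⟩ := hp
      refine ⟨k, hk, by simpa using hsp, ?_⟩
      simpa [PySem.List.slice_to_natCast] using hx
  · rintro (rfl | ⟨k, hk, hsp, rfl⟩)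
    · left; simp [PySem.Set.ofList]
    · right
      refine ⟨((k : Int), clean[k]), ?_, by simpa using hsp, ?_⟩
      · rw [PySem.List.mem_enumerate_iff]; exact ⟨k, hk, by simp⟩
      · simp [PySem.List.slice_to_natCast]

-- A's per-subheading test characterised as membership in B's candidate set
theorem pv_match_iff (clean sub : List Char) :
    (clean == sub || PySem.Chars.startswith clean (sub ++ [' '])) = true ↔ sub ∈ pvCandidates clean := by
  rw [pv_mem_candidates]
  simp only [Bool.or_eq_true, beq_iff_eq, PySem.Chars.startswith_iff]
  constructor
  · rintro (rfl | ⟨rest, hrest⟩)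
    · left; rfl
    · right
      subst hrest
      refine ⟨sub.length, by simp, ?_, by simp⟩
      simp [List.getElem_append_right]
  · rintro (rfl | ⟨k, hk, hsp, rfl⟩)
    · left; rfl
    · right
      refine ⟨clean.drop (k + 1), ?_⟩
      have h1 : clean.take k ++ [' '] = clean.take (k + 1) := by
        rw [List.take_add_one]
        simp [List.getElem?_eq_getElem hk, hsp]
      rw [h1, List.take_append_drop]

theorem pv_cond_eq (clean : List Char) :
    pvSubheadings.any (fun sub =>
        clean == sub || PySem.Chars.startswith clean (sub ++ [' '])) =
      !(PySem.Set.isdisjoint pvProcSet (pvCandidates clean)) := by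
  rw [Bool.eq_iff_iff]
  simp only [List.any_eq_true, Bool.not_eq_true']
  rw [Bool.eq_false_iff, ne_eq, PySem.Set.isdisjoint_iff]
  push Not
  constructor
  · rintro ⟨sub, hsub, hmatch⟩
    refine ⟨sub, ?_, (pv_match_iff clean sub).1 hmatch⟩
    simpa [pvProcSet, PySem.Set.mem_ofList] using hsub
  · rintro ⟨sub, hsub, hx⟩
    refine ⟨sub, ?_, (pv_match_iff clean sub).2 hx⟩
    simpa [pvProcSet, PySem.Set.mem_ofList] using hsub

-- ===== VERDICT (by name: the statement is the Claim_ definition above) =====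
theorem is_procedural_subheading_py_spec : Claim_equal_is_procedural_subheading_py := by
  intro text _
  unfold Spec_is_procedural_subheading_py is_procedural_subheading_py is_procedural_subheading_py_alt
  by_cases h : text == ""
  · simp [h]
  · simp only [h, if_false, Bool.false_eq_true]
    rw [pv_cond_eq]
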